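-- pv_equiv track=rewrite | github.com/Memstem/memstem | src/memstem/hygiene/session_distill.py | _session_id_from_link
-- ===== SOURCE A (Python) =====
-- def _session_id_from_link(link: str) -> str | None:
--     """Pull the session id out of a ``memory://sessions/<id>`` link.
--
--     Returns ``None`` for any other link shape so unrelated frontmatter
--     links don't accidentally mark sessions as distilled.
--     """
--     if not link:
--         return None
--     stripped = link.strip()
--     # Accept both `memory://sessions/<id>` and bare `sessions/<id>` shapes.
--     for prefix in ("memory://sessions/", "sessions/"):
--         if stripped.startswith(prefix):
--             tail = stripped[len(prefix) :]
--             if tail.endswith(".md"):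
--                 tail = tail[: -len(".md")]
--             return tail or None
--     return None
-- ===== SOURCE B (Python) =====
-- def _session_id_from_link(link: str) -> str | None:
--     """Pull the session id out of a ``memory://sessions/<id>`` link.
--
--     Decomposes the link into '/'-separated path segments and pattern-matches
--     the segment list instead of scanning string prefixes.
--     """
--     if not link:
--         return None
--     match link.strip().split("/"):
--         case ["memory:", "", "sessions", *rest] | ["sessions", *rest]:
--             tail = "/".join(rest)
--             if tail.endswith(".md"):
--                 tail = tail[:-3]
--             return tail or None
--         case _:
--             return None
-- ===== Notes on version B (the rewrite author's own statement) =====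
-- stated objective: alternative
-- what changed: Instead of A's two-prefix startswith scan with length-indexed slicing, B splits the stripped link into its slash-separated path segments and structurally pattern-matches the segment list (scheme-qualified or bare sessions path), rejoining the remaining segments as the id.
import Mathlib
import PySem

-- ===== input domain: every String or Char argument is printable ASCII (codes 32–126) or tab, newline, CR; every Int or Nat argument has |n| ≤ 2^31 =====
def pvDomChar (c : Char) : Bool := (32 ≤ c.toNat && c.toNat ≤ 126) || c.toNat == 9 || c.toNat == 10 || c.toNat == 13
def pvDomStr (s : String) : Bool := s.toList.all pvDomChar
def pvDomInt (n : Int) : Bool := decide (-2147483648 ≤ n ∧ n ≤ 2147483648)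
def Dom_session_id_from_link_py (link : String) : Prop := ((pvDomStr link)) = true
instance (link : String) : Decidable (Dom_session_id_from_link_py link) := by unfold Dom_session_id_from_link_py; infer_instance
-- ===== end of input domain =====

-- B parses the link by splitting it into '/'-separated segments and pattern-matching the segment list, instead of A's two-prefix startswith scan (alternative; same cost).


-- ===== PORT A =====
-- the `for prefix in (...)` loop with early return, as structural recursion over the prefix tuple
def pyPrefixLoop (stripped : String) : List String → Option String
  | [] => none
  | p :: rest =>
    if PySem.Str.startswith stripped p then
      let tail := PySem.Str.slice stripped (some (PySem.Str.len p)) none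
      let tail2 := if PySem.Str.endswith tail ".md" then PySem.Str.slice tail none (some (-3)) else tail
      if tail2 = "" then none else some tail2
    else pyPrefixLoop stripped rest

def session_id_from_link_py (link : String) : Option String :=
  if link = "" then none
  else pyPrefixLoop (PySem.Str.strip link) ["memory://sessions/", "sessions/"]

-- ===== PORT B =====
-- the shared body of the two or-patterns: tail = "/".join(rest); strip ".md"; return tail or None
def pyTailOrNone (rest : List String) : Option String :=
  let tail := PySem.Str.join "/" rest
  let tail2 := if PySem.Str.endswith tail ".md" then PySem.Str.slice tail none (some (-3)) else tail
  if tail2 = "" then none else some tail2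

def session_id_from_link_py_alt (link : String) : Option String :=
  if link = "" then none
  else
    -- match link.strip().split("/"):  ("/" is a non-empty separator, so split? always returns some)
    match (PySem.Str.split? (PySem.Str.strip link) "/").getD [] with
    | "memory:" :: "" :: "sessions" :: rest => pyTailOrNone rest
    | "sessions" :: rest => pyTailOrNone rest
    | _ => none

-- ===== PRECONDITION & SPEC =====
def Spec_session_id_from_link_py (link : String) (out : Option String) : Prop := out = session_id_from_link_py_alt link
instance (link : String) (out : Option String) : Decidable (Spec_session_id_from_link_py link out) := by unfold Spec_session_id_from_link_py; infer_instance

-- ===== CLAIM (what is proved, stated in full; the proofs are below) =====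
def Claim_equal_session_id_from_link_py : Prop := ∀ (link : String), Dom_session_id_from_link_py link → Spec_session_id_from_link_py link (session_id_from_link_py link)

-- ===== LEMMAS AND PROOFS =====

-- proof-side model of splitting on the single character '/'
def splitSlash : List Char → List (List Char)
  | [] => [[]]
  | c :: t => if c = '/' then [] :: splitSlash t
              else (c :: (splitSlash t).headI) :: (splitSlash t).tail

theorem splitSlash_exists (l : List Char) : ∃ h tl, splitSlash l = h :: tl := by
  cases l with
  | nil => exact ⟨[], [], rfl⟩
  | cons c t =>
    by_cases hc : c = '/'
    · exact ⟨[], splitSlash t, by simp [splitSlash, hc]⟩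
    · exact ⟨c :: (splitSlash t).headI, (splitSlash t).tail, by simp [splitSlash, hc]⟩

theorem go_spec : ∀ (l : List Char) (fuel : Nat), l.length ≤ fuel → ∀ (cur : List Char) (acc : List (List Char)),
    PySem.Chars.splitOn.go ['/'] fuel l cur acc
      = acc.reverse ++ (cur.reverse ++ (splitSlash l).headI) :: (splitSlash l).tail := by
  intro l
  induction l with
  | nil =>
    intro fuel _ cur acc
    cases fuel <;> simp [PySem.Chars.splitOn.go, splitSlash]
  | cons c t ih =>
    intro fuel hf cur acc
    cases fuel with
    | zero => simp at hf
    | succ f =>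
      obtain ⟨h, tl, hh⟩ := splitSlash_exists t
      by_cases hc : c = '/'
      · subst hc
        rw [show PySem.Chars.splitOn.go ['/'] (f + 1) ('/' :: t) cur acc
              = PySem.Chars.splitOn.go ['/'] f t [] (cur.reverse :: acc) from by
            simp [PySem.Chars.splitOn.go, List.isPrefixOf]]
        rw [ih f (by simpa using hf) [] (cur.reverse :: acc)]
        simp [splitSlash, hh]
      · rw [show PySem.Chars.splitOn.go ['/'] (f + 1) (c :: t) cur acc
              = PySem.Chars.splitOn.go ['/'] f t (c :: cur) acc from by
            simp only [PySem.Chars.splitOn.go]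
            rw [if_neg (by simp [List.isPrefixOf]; exact fun h => hc h.symm)]]
        rw [ih f (by simpa using hf) (c :: cur) acc]
        simp [splitSlash, hc, hh]

theorem splitOn_eq_splitSlash (l : List Char) : PySem.Chars.splitOn l ['/'] = splitSlash l := by
  obtain ⟨h, tl, hh⟩ := splitSlash_exists l
  rw [PySem.Chars.splitOn, go_spec l (l.length + 1) (by omega) [] [], hh]
  simp

theorem join_head_append (x y : List Char) (tl : List (List Char)) :
    PySem.Chars.join ['/'] ((x ++ y) :: tl) = x ++ PySem.Chars.join ['/'] (y :: tl) := by
  cases tl with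
  | nil => simp [PySem.Chars.join_singleton]
  | cons b t => rw [PySem.Chars.join_cons_cons, PySem.Chars.join_cons_cons]; simp

theorem join_splitSlash (l : List Char) : PySem.Chars.join ['/'] (splitSlash l) = l := by
  induction l with
  | nil => simp [splitSlash, PySem.Chars.join_singleton]
  | cons c t ih =>
    obtain ⟨h, tl, hh⟩ := splitSlash_exists t
    by_cases hc : c = '/'
    · subst hc
      rw [show splitSlash ('/' :: t) = [] :: splitSlash t from by simp [splitSlash]]
      rw [hh, PySem.Chars.join_cons_cons, ← hh, ih]
      rfl
    · rw [show splitSlash (c :: t) = (c :: (splitSlash t).headI) :: (splitSlash t).tail from by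
          simp [splitSlash, hc]]
      rw [hh]
      simp only [List.headI, List.tail_cons]
      rw [show (c :: h) = [c] ++ h from rfl, join_head_append, ← hh, ih]
      rfl

theorem splitSlash_append (a : List Char) (b : List Char) (ha : '/' ∉ a) :
    splitSlash (a ++ '/' :: b) = a :: splitSlash b := by
  induction a with
  | nil => simp [splitSlash]
  | cons c a' ih =>
    have hc : c ≠ '/' := fun h => ha (by simp [h])
    obtain ⟨h, tl, hh⟩ := splitSlash_exists b
    rw [List.cons_append]
    simp only [splitSlash, if_neg hc, ih (fun hm => ha (List.mem_cons_of_mem _ hm))]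
    simp

theorem splitSlash_mem (r : List Char) :
    splitSlash ("memory://sessions/".toList ++ r)
      = "memory:".toList :: [] :: "sessions".toList :: splitSlash r := by
  rw [show "memory://sessions/".toList ++ r
        = "memory:".toList ++ '/' :: ([] ++ '/' :: ("sessions".toList ++ '/' :: r)) from rfl,
    splitSlash_append _ _ (by decide), splitSlash_append _ _ (by decide),
    splitSlash_append _ _ (by decide)]

theorem splitSlash_sess (r : List Char) :
    splitSlash ("sessions/".toList ++ r) = "sessions".toList :: splitSlash r := by
  rw [show "sessions/".toList ++ r = "sessions".toList ++ '/' :: r from rfl,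
    splitSlash_append _ _ (by decide)]

theorem join_mem (x : List Char) (xs : List (List Char)) :
    PySem.Chars.join ['/'] ("memory:".toList :: [] :: "sessions".toList :: x :: xs)
      = "memory://sessions/".toList ++ PySem.Chars.join ['/'] (x :: xs) := by
  rw [PySem.Chars.join_cons_cons, PySem.Chars.join_cons_cons, PySem.Chars.join_cons_cons]
  rfl

theorem join_sess (x : List Char) (xs : List (List Char)) :
    PySem.Chars.join ['/'] ("sessions".toList :: x :: xs)
      = "sessions/".toList ++ PySem.Chars.join ['/'] (x :: xs) := by
  rw [PySem.Chars.join_cons_cons]; rfl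

theorem toList_strjoin (parts : List String) :
    (PySem.Str.join "/" parts).toList = PySem.Chars.join ['/'] (parts.map String.toList) := by
  rw [PySem.Str.toList_join]; rfl

theorem slice_drop (t : String) (n : Nat) :
    (PySem.Str.slice t (some (n : Int)) none).toList = t.toList.drop n := by
  simp [PySem.Str.toList_slice]

-- the split of the stripped link, at the char level
theorem split_getD (t : String) :
    (PySem.Str.split? t "/").getD [] = (splitSlash t.toList).map String.ofList := by
  simp [PySem.Str.split?, PySem.Chars.split?, List.isEmpty, splitOn_eq_splitSlash]

-- A's tail and B's rejoined tail are the same string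
theorem tail_eq (t : String) (n : Nat) (x : List Char) (xs : List (List Char))
    (h : t.toList.drop n = PySem.Chars.join ['/'] (x :: xs)) :
    PySem.Str.slice t (some (n : Int)) none
      = PySem.Str.join "/" ((x :: xs).map String.ofList) := by
  apply String.toList_inj.mp
  rw [slice_drop, h, toList_strjoin]
  simp [List.map_map, Function.comp_def, String.toList_ofList]

-- ===== VERDICT (by name: the statement is the Claim_ definition above) =====
theorem session_id_from_link_py_spec : Claim_equal_session_id_from_link_py := by
  intro link _
  unfold Spec_session_id_from_link_py session_id_from_link_py session_id_from_link_py_alt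
  by_cases h0 : link = ""
  · simp [h0]
  · simp only [h0, if_false, split_getD]
    set t := PySem.Str.strip link with ht
    clear_value t
    split
    next rest heq =>
      -- first pattern: parts = "memory:" :: "" :: "sessions" :: rest
      have hX : splitSlash t.toList
          = "memory:".toList :: [] :: "sessions".toList :: rest.map String.toList := by
        have := congrArg (List.map String.toList) heq
        simpa [List.map_map, Function.comp_def, String.toList_ofList] using this
      cases rest with
      | nil =>
        have htl : t = "memory://sessions" := by
          apply String.toList_inj.mp
          rw [← join_splitSlash t.toList, hX]
          rfl
        rw [htl]; decide
      | cons x xs =>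
        have hpre : t.toList
            = "memory://sessions/".toList ++ PySem.Chars.join ['/'] (x.toList :: xs.map String.toList) := by
          conv_lhs => rw [← join_splitSlash t.toList, hX]
          exact join_mem _ _
        have hsw : PySem.Str.startswith t "memory://sessions/" = true := by
          simp only [PySem.Str.startswith_eq]
          rw [PySem.Chars.startswith_iff]
          exact ⟨_, hpre.symm⟩
        simp only [pyPrefixLoop, hsw, if_true]
        have htail : PySem.Str.slice t (some (PySem.Str.len "memory://sessions/")) none
            = PySem.Str.join "/" (x :: xs) := by
          rw [show PySem.Str.len "memory://sessions/" = ((18 : Nat) : Int) from by decide]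
          have := tail_eq t 18 x.toList (xs.map String.toList)
            (by rw [hpre]; rw [show (18 : Nat) = ("memory://sessions/".toList).length from by decide, List.drop_left])
          simpa [List.map_map, Function.comp_def, String.ofList_toList] using this
        rw [htail]
        rfl
    next rest heq =>
      -- second pattern: parts = "sessions" :: rest
      have hX : splitSlash t.toList = "sessions".toList :: rest.map String.toList := by
        have := congrArg (List.map String.toList) heq
        simpa [List.map_map, Function.comp_def, String.toList_ofList] using this
      cases rest with
      | nil =>
        have htl : t = "sessions" := by
          apply String.toList_inj.mp
          rw [← join_splitSlash t.toList, hX]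
          rfl
        rw [htl]; decide
      | cons x xs =>
        have hpre : t.toList
            = "sessions/".toList ++ PySem.Chars.join ['/'] (x.toList :: xs.map String.toList) := by
          conv_lhs => rw [← join_splitSlash t.toList, hX]
          exact join_sess _ _
        have hsw1 : PySem.Str.startswith t "memory://sessions/" = false := by
          simp only [PySem.Str.startswith_eq]
          rw [Bool.eq_false_iff, Ne, PySem.Chars.startswith_iff]
          rintro ⟨u, hu⟩
          rw [hpre] at hu
          rw [show "memory://sessions/".toList = 'm' :: "emory://sessions/".toList from rfl,
            show "sessions/".toList = 's' :: "essions/".toList from rfl] at hu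
          simp at hu
        have hsw2 : PySem.Str.startswith t "sessions/" = true := by
          simp only [PySem.Str.startswith_eq]
          rw [PySem.Chars.startswith_iff]
          exact ⟨_, hpre.symm⟩
        simp only [pyPrefixLoop, hsw1, hsw2, if_true, Bool.false_eq_true, if_false]
        have htail : PySem.Str.slice t (some (PySem.Str.len "sessions/")) none
            = PySem.Str.join "/" (x :: xs) := by
          rw [show PySem.Str.len "sessions/" = ((9 : Nat) : Int) from by decide]
          have := tail_eq t 9 x.toList (xs.map String.toList)
            (by rw [hpre]; rw [show (9 : Nat) = ("sessions/".toList).length from by decide, List.drop_left])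
          simpa [List.map_map, Function.comp_def, String.ofList_toList] using this
        rw [htail]
        rfl
    next hne1 hne2 =>
      -- no pattern matches: A must also return none
      have hsw1 : PySem.Chars.startswith t.toList "memory://sessions/".toList = false := by
        rw [Bool.eq_false_iff, Ne, PySem.Chars.startswith_iff]
        rintro ⟨r, hr⟩
        exact hne1 ((splitSlash r).map String.ofList)
          (by rw [← hr, splitSlash_mem]; simp)
      have hsw2 : PySem.Chars.startswith t.toList "sessions/".toList = false := by
        rw [Bool.eq_false_iff, Ne, PySem.Chars.startswith_iff]
        rintro ⟨r, hr⟩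
        exact hne2 ((splitSlash r).map String.ofList)
          (by rw [← hr, splitSlash_sess]; simp)
      simp at hsw1 hsw2
      simp [pyPrefixLoop, PySem.Str.startswith_eq, hsw1, hsw2]
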